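-- pv_equiv track=rewrite | github.com/nikolay-e/treemapper | src/treemapper/diffctx/edges/semantic/rust.py | _split_brace_items
-- ===== SOURCE A (Python) =====
-- def _split_brace_items(items_str: str) -> tuple[list[str], bool]:
--     items: list[str] = []
--     current: list[str] = []
--     depth = 0
--     has_self = False
--     for ch in items_str:
--         if ch == "{":
--             depth += 1
--             current.append(ch)
--         elif ch == "}":
--             depth -= 1
--             current.append(ch)
--         elif ch == "," and depth == 0:
--             item = "".join(current).strip()
--             if item == "self":
--                 has_self = True
--             elif item:
--                 items.append(item)
--             current = []
--         else:
--             current.append(ch)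
--     item = "".join(current).strip()
--     if item == "self":
--         has_self = True
--     elif item:
--         items.append(item)
--     return items, has_self
-- ===== SOURCE B (Python) =====
-- def _split_brace_items(items_str: str) -> tuple[list[str], bool]:
--     # Phase 1: record depth-0 comma boundaries and slice out raw segments.
--     segments = []
--     start = 0
--     depth = 0
--     for i, ch in enumerate(items_str):
--         if ch == "{":
--             depth += 1
--         elif ch == "}":
--             depth -= 1
--         elif ch == "," and depth == 0:
--             segments.append(items_str[start:i])
--             start = i + 1
--     segments.append(items_str[start:])
--     # Phase 2: classify the segments.
--     items = []
--     has_self = False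
--     for seg in segments:
--         item = seg.strip()
--         if item == "self":
--             has_self = True
--         elif item:
--             items.append(item)
--     return items, has_self
-- ===== Notes on version B (the rewrite author's own statement) =====
-- stated objective: alternative
-- what changed: Replaces A's fused loop with a character buffer and inline classification by two separate passes: a boundary-only scan (tracking just depth and a start index, no buffer) that slices out raw segments, then a classification pass over the segment list.
import Mathlib
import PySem

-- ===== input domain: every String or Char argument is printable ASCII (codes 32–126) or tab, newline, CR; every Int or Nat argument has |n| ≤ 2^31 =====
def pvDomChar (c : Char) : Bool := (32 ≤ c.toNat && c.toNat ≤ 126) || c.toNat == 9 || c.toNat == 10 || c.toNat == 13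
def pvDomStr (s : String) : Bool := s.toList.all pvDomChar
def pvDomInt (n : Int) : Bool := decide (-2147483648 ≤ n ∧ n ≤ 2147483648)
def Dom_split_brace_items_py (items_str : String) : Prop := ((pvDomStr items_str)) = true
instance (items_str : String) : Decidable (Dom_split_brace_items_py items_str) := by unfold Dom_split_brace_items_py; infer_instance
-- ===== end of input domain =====

-- B replaces A's fused buffer-accumulating loop by two passes: a boundary-only scan that
-- slices out the raw segments, then a classification pass over the segment list (alternative decomposition).

-- ===== PORT A =====
-- A's single loop: state (items, current buffer, depth, has_self), classification inline.
def pvALoop (chars : List Char) (items : List String) (current : List Char)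
    (depth : Int) (has_self : Bool) : List String × Bool :=
  match chars with
  | [] =>
    let item := PySem.Str.strip (String.ofList current)
    if item = "self" then (items, true)
    else if item ≠ "" then (items ++ [item], has_self)
    else (items, has_self)
  | ch :: rest =>
    if ch = '{' then pvALoop rest items (current ++ [ch]) (depth + 1) has_self
    else if ch = '}' then pvALoop rest items (current ++ [ch]) (depth - 1) has_self
    else if ch = ',' ∧ depth = 0 then
      let item := PySem.Str.strip (String.ofList current)
      if item = "self" then pvALoop rest items [] depth true
      else if item ≠ "" then pvALoop rest (items ++ [item]) [] depth has_self
      else pvALoop rest items [] depth has_self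
    else pvALoop rest items (current ++ [ch]) depth has_self

def split_brace_items_py (items_str : String) : List String × Bool :=
  pvALoop items_str.toList [] [] 0 false

-- ===== PORT B =====
-- B phase 1: scan enumerated characters keeping only (start, depth); emit slices at depth-0 commas.
def pvBScan (cs : List Char) (pairs : List (Int × Char)) (start : Int) (depth : Int)
    (segs : List (List Char)) : List (List Char) :=
  match pairs with
  | [] => segs ++ [PySem.List.slice cs (some start) none]
  | (i, ch) :: rest =>
    if ch = '{' then pvBScan cs rest start (depth + 1) segs
    else if ch = '}' then pvBScan cs rest start (depth - 1) segs
    else if ch = ',' ∧ depth = 0 then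
      pvBScan cs rest (i + 1) depth (segs ++ [PySem.List.slice cs (some start) (some i)])
    else pvBScan cs rest start depth segs

-- B phase 2: classify one segment.
def pvBClassify (st : List String × Bool) (seg : List Char) : List String × Bool :=
  let item := PySem.Str.strip (String.ofList seg)
  if item = "self" then (st.1, true)
  else if item ≠ "" then (st.1 ++ [item], st.2)
  else st

def split_brace_items_py_alt (items_str : String) : List String × Bool :=
  (pvBScan items_str.toList (PySem.List.enumerate items_str.toList 0) 0 0 []).foldl
    pvBClassify ([], false)

-- ===== PRECONDITION & SPEC =====
def Spec_split_brace_items_py (items_str : String) (out : List String × Bool) : Prop := out = split_brace_items_py_alt items_str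
instance (items_str : String) (out : List String × Bool) : Decidable (Spec_split_brace_items_py items_str out) := by unfold Spec_split_brace_items_py; infer_instance

-- ===== CLAIM (what is proved, stated in full; the proofs are below) =====
def Claim_equal_split_brace_items_py : Prop := ∀ (items_str : String), Dom_split_brace_items_py items_str → Spec_split_brace_items_py items_str (split_brace_items_py items_str)

-- ===== LEMMAS AND PROOFS =====

-- pvBScan is accumulator-appending.
theorem pvBScan_append (cs : List Char) (pairs : List (Int × Char)) (start depth : Int)
    (segs : List (List Char)) :
    pvBScan cs pairs start depth segs = segs ++ pvBScan cs pairs start depth [] := by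
  induction pairs generalizing start depth segs with
  | nil => simp [pvBScan]
  | cons p rest ih =>
    obtain ⟨i, ch⟩ := p
    simp only [pvBScan]
    split_ifs with h1 h2 h3
    · exact ih _ _ _
    · exact ih _ _ _
    · rw [ih (i + 1) depth (segs ++ [_]), ih (i + 1) depth ([] ++ [_])]; simp
    · exact ih _ _ _

-- the slice taken at a comma equals A's buffer
theorem slice_eq_buffer (done rest : List Char) (start : Nat) (h : start ≤ done.length) :
    PySem.List.slice (done ++ rest) (some (start : Int)) (some (done.length : Int))
      = done.drop start := by
  rw [PySem.List.slice_natCast]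
  rw [List.drop_append_of_le_length h]
  rw [List.take_append_of_le_length (by simp)]
  simp

-- main invariant: A's fused loop equals folding classification over B's remaining scan,
-- where A's buffer is done.drop start.
theorem pvLoop_eq_scan (rest done : List Char) (start : Nat) (depth : Int)
    (items : List String) (has_self : Bool) (h : start ≤ done.length) :
    pvALoop rest items (done.drop start) depth has_self
      = (pvBScan (done ++ rest) (PySem.List.enumerate rest (done.length : Int))
          (start : Int) depth []).foldl pvBClassify (items, has_self) := by
  induction rest generalizing done start depth items has_self with
  | nil =>
    simp only [PySem.List.enumerate_nil, pvBScan, pvALoop, List.append_nil,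
      PySem.List.slice_from_natCast, List.nil_append, List.foldl_cons, List.foldl_nil,
      pvBClassify]
  | cons ch rs ih =>
    rw [PySem.List.enumerate_cons]
    simp only [pvALoop, pvBScan]
    have hcons : (done ++ ch :: rs) = (done ++ [ch]) ++ rs := by simp
    have hlen : (done.length : Int) + 1 = (((done ++ [ch]).length : Nat) : Int) := by simp
    have hdrop : done.drop start ++ [ch] = (done ++ [ch]).drop start := by
      rw [List.drop_append_of_le_length h]
    by_cases h1 : ch = '{'
    · simp only [if_pos h1]
      rw [hdrop, hcons, hlen, ih _ _ _ _ _ (by simp; omega)]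
    simp only [if_neg h1]
    by_cases h2 : ch = '}'
    · simp only [if_pos h2]
      rw [hdrop, hcons, hlen, ih _ _ _ _ _ (by simp; omega)]
    simp only [if_neg h2]
    by_cases h3 : ch = ',' ∧ depth = 0
    · -- comma at depth 0: B emits the slice, A classifies the buffer
      simp only [if_pos h3]
      rw [pvBScan_append, List.foldl_append, slice_eq_buffer _ _ _ h]
      simp only [List.nil_append, List.foldl_cons, List.foldl_nil]
      have H : ∀ (items' : List String) (hs' : Bool),
          pvALoop rs items' [] depth hs'
            = (pvBScan ((done ++ [ch]) ++ rs)
                (PySem.List.enumerate rs (((done ++ [ch]).length : Nat) : Int))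
                (((done ++ [ch]).length : Nat) : Int) depth []).foldl pvBClassify
                (items', hs') := by
        intro items' hs'
        have := ih (done ++ [ch]) (done ++ [ch]).length depth items' hs' (le_refl _)
        simpa only [List.drop_length] using this
      simp only [pvBClassify]
      split_ifs with h4 h5
      · rw [hcons, hlen]; exact H items true
      · rw [hcons, hlen]; exact H (items ++ [_]) has_self
      · rw [hcons, hlen]; exact H items has_self
    simp only [if_neg h3]
    rw [hdrop, hcons, hlen, ih _ _ _ _ _ (by simp; omega)]

-- ===== VERDICT (by name: the statement is the Claim_ definition above) =====
theorem split_brace_items_py_spec : Claim_equal_split_brace_items_py := by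
  intro s _
  show split_brace_items_py s = split_brace_items_py_alt s
  unfold split_brace_items_py split_brace_items_py_alt
  have := pvLoop_eq_scan s.toList [] 0 0 [] false (by simp)
  simpa using this
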